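-- pv_equiv track=rewrite | github.com/kwichmann/euler | pe026.py | reciprocal_periodicity
-- ===== SOURCE A (Python) =====
-- def reciprocal_periodicity(n):
--     remainders = [1]
--     while True:
--         r = remainders[-1] % n
--         if r == 0:
--             return 0
--         d = r * 10
--         if d in remainders:
--             return len(remainders) - remainders.index(d)
--         remainders.append(d)
-- ===== SOURCE B (Python) =====
-- def reciprocal_periodicity(n):
--     1 % n  # raises ZeroDivisionError for n == 0, just like the original
--     m = abs(n)
--     while m % 2 == 0:
--         m //= 2
--     while m % 5 == 0:
--         m //= 5
--     if m == 1:
--         return 0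
--     r = 10 % m
--     k = 1
--     while r != 1:
--         r = r * 10 % m
--         k += 1
--     return k
-- ===== Notes on version B (the rewrite author's own statement) =====
-- stated objective: faster
-- what changed: Instead of growing a history list of scaled remainders and scanning it with 'in'/'.index' each step, B strips the factors 2 and 5 from |n| and counts the multiplicative order of 10 modulo the stripped part with a single O(1)-state loop (no history at all).
import Mathlib
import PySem

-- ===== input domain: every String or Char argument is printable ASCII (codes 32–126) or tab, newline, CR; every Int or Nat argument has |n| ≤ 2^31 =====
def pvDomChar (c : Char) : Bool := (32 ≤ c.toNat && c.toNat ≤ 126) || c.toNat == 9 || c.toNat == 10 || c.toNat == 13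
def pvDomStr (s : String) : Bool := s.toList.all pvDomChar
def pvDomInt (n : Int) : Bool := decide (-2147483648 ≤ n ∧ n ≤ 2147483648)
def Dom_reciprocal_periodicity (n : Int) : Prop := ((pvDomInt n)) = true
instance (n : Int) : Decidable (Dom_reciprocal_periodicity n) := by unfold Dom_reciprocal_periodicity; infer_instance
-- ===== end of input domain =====

-- B replaces A's growing remainder-history list (scanned by 'in'/'.index' each step) by stripping
-- the factors 2 and 5 from |n| and counting the multiplicative order of 10 modulo the stripped part.

-- ===== PORT A =====
-- 'while True' is ported with fuel; the fuel 2*|n|+2 is proved sufficient below.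
def pvLoopA (n : Int) : Nat → List Int → Int
  | 0, _ => 0
  | fuel+1, remainders =>
    let r := PySem.Int.mod (PySem.List.pyGetD remainders (-1) 0) n   -- remainders[-1] % n (list never empty)
    if r = 0 then 0
    else
      let d := r * 10
      if d ∈ remainders then
        PySem.List.len remainders - (((PySem.List.index? remainders d).getD 0 : Nat) : Int)
      else pvLoopA n fuel (remainders ++ [d])

def reciprocal_periodicity (n : Int) : Int := pvLoopA n (2 * n.natAbs + 2) [1]

-- ===== PORT B =====
-- 'while m % 2 == 0: m //= 2' ; the 'm ≠ 0' conjunct is a totality guard only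
-- (Python diverges at m = 0, which is unreachable since n = 0 raises first).
def pvStrip2 (m : Nat) : Nat :=
  if h : m % 2 = 0 ∧ m ≠ 0 then pvStrip2 (m / 2) else m
  decreasing_by exact Nat.div_lt_self (Nat.pos_of_ne_zero h.2) (by omega)

def pvStrip5 (m : Nat) : Nat :=
  if h : m % 5 = 0 ∧ m ≠ 0 then pvStrip5 (m / 5) else m
  decreasing_by exact Nat.div_lt_self (Nat.pos_of_ne_zero h.2) (by omega)

-- 'while r != 1: r = r * 10 % m; k += 1' with fuel (fuel m is proved sufficient below)
def pvOrderLoop (m : Nat) : Nat → Nat → Nat → Nat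
  | 0, _, k => k
  | fuel+1, r, k => if r = 1 then k else pvOrderLoop m fuel (r * 10 % m) (k + 1)

def reciprocal_periodicity_alt (n : Int) : Int :=
  -- '1 % n' raises exactly for n = 0; Pre_ excludes that input
  let m := pvStrip5 (pvStrip2 n.natAbs)   -- m = abs(n) with the factors 2 and 5 removed
  if m = 1 then 0
  else ((pvOrderLoop m m (10 % m) 1 : Nat) : Int)

-- ===== PRECONDITION & SPEC =====
-- n = 0 raises ZeroDivisionError in both programs.
def Pre_reciprocal_periodicity (n : Int) : Prop := n ≠ 0
instance (n : Int) : Decidable (Pre_reciprocal_periodicity n) := by unfold Pre_reciprocal_periodicity; infer_instance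
def pvWitness_reciprocal_periodicity : Int := 7

def Spec_reciprocal_periodicity (n : Int) (out : Int) : Prop := out = reciprocal_periodicity_alt n
instance (n : Int) (out : Int) : Decidable (Spec_reciprocal_periodicity n out) := by unfold Spec_reciprocal_periodicity; infer_instance

-- ===== CLAIM (what is proved, stated in full; the proofs are below) =====
def Claim_equal_reciprocal_periodicity : Prop := ∀ (n : Int), Dom_reciprocal_periodicity n → Pre_reciprocal_periodicity n → Spec_reciprocal_periodicity n (reciprocal_periodicity n)

-- ===== LEMMAS AND PROOFS =====
theorem pvFmod_sub_dvd (n x : Int) : n ∣ (x - Int.fmod x n) := by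
  rw [Int.fmod_eq_emod]
  split_ifs with h
  · simp [Int.emod_def]
  · have hx : x - (x % n + n) = n * (x / n) - n := by rw [Int.emod_def]; ring
    rw [hx]; exact dvd_sub (Dvd.intro _ rfl) (dvd_refl n)

theorem pvFmod_eq_iff (n a b : Int) (_hn : n ≠ 0) :
    Int.fmod a n = Int.fmod b n ↔ n ∣ (b - a) := by
  constructor
  · intro h
    have h1 := pvFmod_sub_dvd n a
    have h2 := pvFmod_sub_dvd n b
    have hx : b - a = (b - Int.fmod b n) - (a - Int.fmod a n) := by rw [h]; ring
    rw [hx]; exact dvd_sub h2 h1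
  · intro h
    have hemod : a % n = b % n := Int.modEq_iff_dvd.mpr h
    have hda : n ∣ a ↔ n ∣ b := by
      constructor <;> intro hd
      · exact Int.dvd_of_emod_eq_zero (hemod ▸ Int.emod_eq_zero_of_dvd hd)
      · exact Int.dvd_of_emod_eq_zero (hemod.symm ▸ Int.emod_eq_zero_of_dvd hd)
    rw [Int.fmod_eq_emod, Int.fmod_eq_emod, hemod]
    congr 1
    simp only [hda]

def pvRR (n : Int) (j : Nat) : Int := PySem.Int.mod (10 ^ j) n
def pvHist (n : Int) (j : Nat) : List Int := 1 :: (List.range j).map (fun i => pvRR n i * 10)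

theorem pvHist_succ (n : Int) (j : Nat) :
    pvHist n j ++ [pvRR n j * 10] = pvHist n (j+1) := by
  simp [pvHist, List.range_succ]

theorem pvHist_last (n : Int) (j : Nat) :
    PySem.Int.mod (PySem.List.pyGetD (pvHist n j) (-1) 0) n = pvRR n j := by
  cases j with
  | zero => simp [pvHist, pvRR, PySem.List.pyGetD, PySem.List.pyGet?_neg_one]
  | succ i =>
    rw [← pvHist_succ, PySem.List.pyGetD_neg_one_append_singleton]
    show PySem.Int.mod (pvRR n i * 10) n = pvRR n (i+1)
    simp only [PySem.Int.mod, pvRR]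
    rcases eq_or_ne n 0 with rfl | hn
    · simp [Int.fmod_zero, pow_succ]
    · refine (pvFmod_eq_iff n _ _ hn).mpr ?_
      have hx : (10:Int)^(i+1) - Int.fmod (10^i) n * 10 = (10^i - Int.fmod (10^i) n) * 10 := by
        rw [pow_succ]; ring
      rw [hx]
      exact Dvd.dvd.mul_right (pvFmod_sub_dvd n _) 10

theorem pvMem_hist (n : Int) (j : Nat) (_hnz : pvRR n j ≠ 0) :
    (pvRR n j * 10) ∈ pvHist n j ↔ ∃ i < j, pvRR n i = pvRR n j := by
  simp only [pvHist, List.mem_cons, List.mem_map, List.mem_range]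
  constructor
  · rintro (h | ⟨i, hi, he⟩)
    · omega
    · exact ⟨i, hi, by omega⟩
  · rintro ⟨i, hi, he⟩
    exact Or.inr ⟨i, hi, by omega⟩

theorem pvIndexLemma (f : Nat → Int) (K μ : Nat) (hμ : μ < K) (hv : ∀ i < μ, f i ≠ f μ) :
    PySem.List.index? ((List.range K).map f) (f μ) = some μ := by
  rw [PySem.List.index?_eq_some_iff]
  obtain ⟨t, ht⟩ : ∃ t, K - μ = t + 1 := ⟨K - μ - 1, by omega⟩
  refine ⟨(List.range μ).map f, ((List.range t).map (fun x => μ + (x+1))).map f, ?_, by simp, ?_⟩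
  · have : K = μ + (K - μ) := by omega
    rw [this, List.range_add, ht, List.range_succ_eq_map]
    simp [Function.comp]
  · simp only [List.mem_map, List.mem_range]
    rintro ⟨i, hi, he⟩
    exact hv i hi he

theorem pvRR_eq_iff (n : Int) (hn : n ≠ 0) (i j : Nat) (hij : i ≤ j) :
    pvRR n i = pvRR n j ↔ n.natAbs ∣ 10^i * (10^(j-i) - 1) := by
  simp only [pvRR, PySem.Int.mod]
  rw [pvFmod_eq_iff n _ _ hn]
  have h1 : (1:Nat) ≤ 10^(j-i) := Nat.one_le_pow _ _ (by omega)
  have hcast : ((10^i * (10^(j-i) - 1) : Nat) : Int) = (10:Int)^j - 10^i := by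
    push_cast [h1]
    rw [mul_sub, mul_one, ← pow_add]
    congr 2
    omega
  rw [← Int.natAbs_dvd (a := n), ← hcast, Int.natCast_dvd_natCast]

theorem pvRR_zero_iff (n : Int) (j : Nat) : pvRR n j = 0 ↔ n.natAbs ∣ 10^j := by
  rw [pvRR, PySem.Int.mod_eq_zero_iff_dvd, ← Int.natAbs_dvd (a := n)]
  norm_cast

theorem pvKey (N a b m : Nat) (hfac : N = 2^a * 5^b * m) (h2 : ¬ 2 ∣ m) (h5 : ¬ 5 ∣ m)
    (i d : Nat) (hd : 0 < d) (hdvd : N ∣ 10^i * (10^d - 1)) :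
    a ≤ i ∧ b ≤ i ∧ m ∣ 10^d - 1 := by
  have h10 : (10:Nat)^d = 2^d * 5^d := by rw [← Nat.mul_pow]
  have hodd : ¬ 2 ∣ (10^d - 1) := by
    have : 2 ∣ 10^d := Dvd.dvd.pow (by norm_num) (by omega)
    have h1 : (1:Nat) ≤ 10^d := Nat.one_le_pow _ _ (by omega)
    omega
  have hnot5 : ¬ 5 ∣ (10^d - 1) := by
    have : 5 ∣ 10^d := Dvd.dvd.pow (by norm_num) (by omega)
    have h1 : (1:Nat) ≤ 10^d := Nat.one_le_pow _ _ (by omega)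
    omega
  have ha : a ≤ i := by
    have h2N : 2^a ∣ N := hfac ▸ ⟨5^b*m, by ring⟩
    have hNd : N ∣ 2^i * (5^i * (10^d - 1)) := by rw [← mul_assoc, ← Nat.mul_pow]; exact hdvd
    have hda : 2^a ∣ 2^i * (5^i * (10^d - 1)) := h2N.trans hNd
    have hcop : Nat.Coprime 2 (5^i * (10^d - 1)) := by
      have c1 : Nat.Coprime 2 (5^i) := Nat.Coprime.pow_right _ (by norm_num)
      have c2 : Nat.Coprime 2 (10^d - 1) := (Nat.Prime.coprime_iff_not_dvd Nat.prime_two).mpr hodd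
      exact Nat.Coprime.mul_right c1 c2
    have := (Nat.Coprime.pow_left a hcop).dvd_of_dvd_mul_right hda
    exact (Nat.pow_dvd_pow_iff_le_right (by norm_num)).mp this
  have hb : b ≤ i := by
    have h5N : 5^b ∣ N := hfac ▸ ⟨2^a*m, by ring⟩
    have hNd : N ∣ 5^i * (2^i * (10^d - 1)) := by
      rw [← mul_assoc, mul_comm ((5:Nat)^i) (2^i), ← Nat.mul_pow]; exact hdvd
    have hda : 5^b ∣ 5^i * (2^i * (10^d - 1)) := h5N.trans hNd
    have hcop : Nat.Coprime 5 (2^i * (10^d - 1)) := by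
      have c1 : Nat.Coprime 5 (2^i) := Nat.Coprime.pow_right _ (by norm_num)
      have c2 : Nat.Coprime 5 (10^d - 1) := (Nat.Prime.coprime_iff_not_dvd (by norm_num)).mpr hnot5
      exact Nat.Coprime.mul_right c1 c2
    have := (Nat.Coprime.pow_left b hcop).dvd_of_dvd_mul_right hda
    exact (Nat.pow_dvd_pow_iff_le_right (by norm_num)).mp this
  refine ⟨ha, hb, ?_⟩
  have hdm : m ∣ 10^i * (10^d - 1) := dvd_trans (hfac ▸ Dvd.intro_left _ rfl) hdvd
  have hcop : Nat.Coprime m (10^i) := by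
    have c2 : Nat.Coprime m 2 := ((Nat.Prime.coprime_iff_not_dvd Nat.prime_two).mpr h2).symm
    have c5 : Nat.Coprime m 5 := ((Nat.Prime.coprime_iff_not_dvd (by norm_num)).mpr h5).symm
    have : Nat.Coprime m 10 := by
      have : (10:Nat) = 2 * 5 := by norm_num
      rw [this]; exact Nat.Coprime.mul_right c2 c5
    exact Nat.Coprime.pow_right i this
  exact hcop.dvd_of_dvd_mul_left hdm

theorem pvRep (N a b m : Nat) (hfac : N = 2^a * 5^b * m) (μ t : Nat)
    (ha : a ≤ μ) (hb : b ≤ μ) (hm : m ∣ 10^t - 1) : N ∣ 10^μ * (10^t - 1) := by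
  have h10 : (10:Nat)^μ = 2^μ * 5^μ := by rw [← Nat.mul_pow]
  rw [hfac, h10]
  exact Nat.mul_dvd_mul (Nat.mul_dvd_mul (Nat.pow_dvd_pow 2 ha) (Nat.pow_dvd_pow 5 hb)) hm

theorem pvRunA0 (n : Int) (K : Nat)
    (Hnz : ∀ j < K, pvRR n j ≠ 0)
    (Hinj : ∀ i j, i < j → j < K → pvRR n i ≠ pvRR n j)
    (HK : pvRR n K = 0) :
    ∀ fuel j, j ≤ K → K - j < fuel → pvLoopA n fuel (pvHist n j) = 0 := by
  intro fuel
  induction fuel with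
  | zero => intro j _ h; omega
  | succ f ih =>
    intro j hj hf
    show pvLoopA n (f+1) (pvHist n j) = 0
    simp only [pvLoopA, pvHist_last n j]
    rcases eq_or_ne j K with rfl | hjK
    · simp [HK]
    · have hjlt : j < K := by omega
      rw [if_neg (Hnz j hjlt)]
      have hmem : ¬ (pvRR n j * 10) ∈ pvHist n j := by
        rw [pvMem_hist n j (Hnz j hjlt)]
        rintro ⟨i, hi, he⟩
        exact Hinj i j hi hjlt he
      rw [if_neg hmem, pvHist_succ]
      exact ih (j+1) (by omega) (by omega)

theorem pvRunA (n : Int) (K μ : Nat) (hμK : μ < K)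
    (Hnz : ∀ j, j ≤ K → pvRR n j ≠ 0)
    (Hinj : ∀ i j, i < j → j < K → pvRR n i ≠ pvRR n j)
    (Hfirst : ∀ i < μ, pvRR n i ≠ pvRR n K)
    (Hrep : pvRR n μ = pvRR n K) :
    ∀ fuel j, j ≤ K → K - j < fuel → pvLoopA n fuel (pvHist n j) = (K : Int) - (μ : Int) := by
  intro fuel
  induction fuel with
  | zero => intro j _ h; omega
  | succ f ih =>
    intro j hj hf
    show pvLoopA n (f+1) (pvHist n j) = (K : Int) - (μ : Int)
    simp only [pvLoopA, pvHist_last n j]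
    rw [if_neg (Hnz j hj)]
    rcases eq_or_ne j K with rfl | hjK
    · have hmem : (pvRR n j * 10) ∈ pvHist n j :=
        (pvMem_hist n j (Hnz j hj)).mpr ⟨μ, hμK, Hrep⟩
      rw [if_pos hmem]
      -- compute the index: d = f μ with f i = pvRR n i * 10
      have hd : pvRR n j * 10 = pvRR n μ * 10 := by rw [Hrep]
      have hidx : PySem.List.index? (pvHist n j) (pvRR n j * 10) = some (μ + 1) := by
        show PySem.List.index? (1 :: (List.range j).map (fun i => pvRR n i * 10)) _ = _
        rw [PySem.List.index?_cons_of_ne]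
        · rw [hd]
          have hno : ∀ i < μ, (fun i => pvRR n i * 10) i ≠ (fun i => pvRR n i * 10) μ := by
            intro i hi he
            have hcc : pvRR n i = pvRR n μ := mul_right_cancel₀ (b := (10:Int)) (by norm_num) he
            exact Hfirst i hi (hcc.trans Hrep)
          have hix := pvIndexLemma (fun i => pvRR n i * 10) j μ hμK hno
          rw [hix]
          rfl
        · have := Hnz j hj; intro hc; omega
      rw [hidx]
      have hlen : (pvHist n j).length = j + 1 := by simp [pvHist]
      simp only [Option.getD_some, PySem.List.len_eq, hlen]
      push_cast
      omega
    · have hjlt : j < K := by omega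
      have hmem : ¬ (pvRR n j * 10) ∈ pvHist n j := by
        rw [pvMem_hist n j (Hnz j (by omega))]
        rintro ⟨i, hi, he⟩
        exact Hinj i j hi hjlt he
      rw [if_neg hmem, pvHist_succ]
      exact ih (j+1) (by omega) (by omega)

theorem pvModOne_iff (m k : Nat) (hm : 1 < m) : 10^k % m = 1 ↔ m ∣ 10^k - 1 := by
  have h1 : (1:Nat) ≤ 10^k := Nat.one_le_pow _ _ (by omega)
  rw [← Nat.modEq_iff_dvd' h1]
  unfold Nat.ModEq
  rw [Nat.mod_eq_of_lt hm]
  exact ⟨fun h => h.symm, fun h => h.symm⟩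

theorem pvRunB (m : Nat) (hm : 1 < m) (lam : Nat) (_hlam1 : 0 < lam) (hlam : m ∣ 10^lam - 1)
    (hmin : ∀ t, 0 < t → m ∣ 10^t - 1 → lam ≤ t) :
    ∀ fuel k, 0 < k → k ≤ lam → lam - k ≤ fuel → pvOrderLoop m fuel (10^k % m) k = lam := by
  intro fuel
  induction fuel with
  | zero =>
    intro k hk hkl hf
    have hke : k = lam := by omega
    simp [pvOrderLoop, hke]
  | succ f ih =>
    intro k hk hkl hf
    show pvOrderLoop m (f+1) (10^k % m) k = lam
    simp only [pvOrderLoop]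
    by_cases h1 : 10^k % m = 1
    · rw [if_pos h1]
      exact le_antisymm hkl (hmin k hk ((pvModOne_iff m k hm).mp h1))
    · rw [if_neg h1]
      have hklt : k < lam := by
        rcases Nat.lt_or_ge k lam with h | h
        · exact h
        · exact absurd ((pvModOne_iff m lam hm).mpr hlam) (by
            have : k = lam := by omega
            rw [← this]; exact fun hc => h1 ((this ▸ hc : 10^k % m = 1)))
      have hstep : 10^k % m * 10 % m = 10^(k+1) % m := by
        rw [Nat.mod_mul_mod, ← pow_succ]
      rw [hstep]
      exact ih (k+1) (by omega) hklt (by omega)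

theorem pvStrip2_spec (M : Nat) : ∃ a, M = 2^a * pvStrip2 M := by
  induction M using pvStrip2.induct with
  | case1 m h ih =>
    obtain ⟨a, ha⟩ := ih
    refine ⟨a + 1, ?_⟩
    have hs : pvStrip2 m = pvStrip2 (m / 2) := by rw [pvStrip2, dif_pos h]
    rw [hs]
    calc m = 2 * (m / 2) := by omega
    _ = 2 * (2^a * pvStrip2 (m/2)) := by rw [← ha]
    _ = 2^(a+1) * pvStrip2 (m/2) := by ring
  | case2 m h => exact ⟨0, by rw [pvStrip2, dif_neg h]; ring⟩

theorem pvStrip2_not_dvd (M : Nat) (hM : M ≠ 0) : ¬ 2 ∣ pvStrip2 M := by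
  induction M using pvStrip2.induct with
  | case1 m h ih =>
    rw [pvStrip2, dif_pos h]
    exact ih (by omega)
  | case2 m h =>
    rw [pvStrip2, dif_neg h]
    intro hd
    rcases (Decidable.not_and_iff_or_not ..).mp h with h1 | h2
    · omega
    · simp at h2; omega

theorem pvStrip5_spec (M : Nat) : ∃ b, M = 5^b * pvStrip5 M := by
  induction M using pvStrip5.induct with
  | case1 m h ih =>
    obtain ⟨a, ha⟩ := ih
    refine ⟨a + 1, ?_⟩
    have hs : pvStrip5 m = pvStrip5 (m / 5) := by rw [pvStrip5, dif_pos h]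
    rw [hs]
    calc m = 5 * (m / 5) := by omega
    _ = 5 * (5^a * pvStrip5 (m/5)) := by rw [← ha]
    _ = 5^(a+1) * pvStrip5 (m/5) := by ring
  | case2 m h => exact ⟨0, by rw [pvStrip5, dif_neg h]; ring⟩

theorem pvStrip5_not_dvd (M : Nat) (hM : M ≠ 0) : ¬ 5 ∣ pvStrip5 M := by
  induction M using pvStrip5.induct with
  | case1 m h ih =>
    rw [pvStrip5, dif_pos h]
    exact ih (by omega)
  | case2 m h =>
    rw [pvStrip5, dif_neg h]
    intro hd
    rcases (Decidable.not_and_iff_or_not ..).mp h with h1 | h2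
    · omega
    · simp at h2; omega

theorem pvKey0 (a b j : Nat) (hdvd : 2^a * 5^b ∣ 10^j) : a ≤ j ∧ b ≤ j := by
  have h10 : (10:Nat)^j = 2^j * 5^j := by rw [← Nat.mul_pow]
  constructor
  · have hda : 2^a ∣ 2^j * 5^j := h10 ▸ (dvd_trans ⟨5^b, rfl⟩ hdvd)
    have hcop : Nat.Coprime 2 (5^j) := Nat.Coprime.pow_right _ (by norm_num)
    have := (Nat.Coprime.pow_left a hcop).dvd_of_dvd_mul_right hda
    exact (Nat.pow_dvd_pow_iff_le_right (by norm_num)).mp this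
  · have hda : 5^b ∣ 5^j * 2^j := by
      rw [mul_comm ((5:Nat)^j)]
      exact h10 ▸ (dvd_trans (Dvd.intro_left _ rfl) hdvd)
    have hcop : Nat.Coprime 5 (2^j) := Nat.Coprime.pow_right _ (by norm_num)
    have := (Nat.Coprime.pow_left b hcop).dvd_of_dvd_mul_right hda
    exact (Nat.pow_dvd_pow_iff_le_right (by norm_num)).mp this

theorem pvCop (m : Nat) (h2 : ¬ 2 ∣ m) (h5 : ¬ 5 ∣ m) : Nat.Coprime m 10 := by
  have c2 : Nat.Coprime m 2 := ((Nat.Prime.coprime_iff_not_dvd Nat.prime_two).mpr h2).symm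
  have c5 : Nat.Coprime m 5 := ((Nat.Prime.coprime_iff_not_dvd (by norm_num)).mpr h5).symm
  have h10 : (10:Nat) = 2 * 5 := by norm_num
  rw [h10]
  exact Nat.Coprime.mul_right c2 c5

theorem pvMain (n : Int) (hn : n ≠ 0) :
    pvLoopA n (2 * n.natAbs + 2) [1] =
      (if pvStrip5 (pvStrip2 n.natAbs) = 1 then (0:Int)
       else ((pvOrderLoop (pvStrip5 (pvStrip2 n.natAbs)) (pvStrip5 (pvStrip2 n.natAbs))
               (10 % pvStrip5 (pvStrip2 n.natAbs)) 1 : Nat) : Int)) := by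
  have hN : n.natAbs ≠ 0 := Int.natAbs_ne_zero.mpr hn
  set N := n.natAbs with hNdef
  obtain ⟨a, ha⟩ := pvStrip2_spec N
  obtain ⟨b, hb⟩ := pvStrip5_spec (pvStrip2 N)
  set s2 := pvStrip2 N with hs2def
  set m := pvStrip5 s2 with hmdef
  have hfac : N = 2^a * 5^b * m := by rw [ha, hb]; ring
  have hs2ne : s2 ≠ 0 := by intro h; rw [h, mul_zero] at ha; exact hN ha
  have hmne : m ≠ 0 := by intro h; rw [h, mul_zero] at hb; exact hs2ne hb
  have h2s2 : ¬ 2 ∣ s2 := pvStrip2_not_dvd N hN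
  have h5m : ¬ 5 ∣ m := pvStrip5_not_dvd s2 hs2ne
  have hms2 : m ∣ s2 := hb ▸ Dvd.intro_left _ rfl
  have h2m : ¬ 2 ∣ m := fun hd => h2s2 (hd.trans hms2)
  have hmN : m ∣ N := hfac ▸ Dvd.intro_left _ rfl
  have hNpos : 0 < N := Nat.pos_of_ne_zero hN
  -- size bounds
  have haN : a ≤ N := by
    have h2a : 2^a ∣ N := hfac ▸ ⟨5^b * m, by ring⟩
    have := Nat.le_of_dvd hNpos h2a
    have := Nat.lt_two_pow_self (n := a)
    omega
  have hbN : b ≤ N := by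
    have h5b : 5^b ∣ N := hfac ▸ ⟨2^a * m, by ring⟩
    have h1 := Nat.le_of_dvd hNpos h5b
    have h2 : 2^b ≤ 5^b := Nat.pow_le_pow_left (by norm_num) b
    have := Nat.lt_two_pow_self (n := b)
    omega
  have hμN : max a b ≤ N := by omega
  have hhist0 : pvHist n 0 = [1] := by simp [pvHist]
  by_cases hm1 : m = 1
  · -- terminating decimal: N = 2^a·5^b, loop exits with 0 at step max a b
    rw [if_pos hm1]
    have hfac' : N = 2^a * 5^b := by rw [hfac, hm1, mul_one]
    refine (hhist0 ▸ pvRunA0 n (max a b) ?_ ?_ ?_ (2*N+2) 0 (by omega) (by omega))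
    · intro j hj hz
      have := (pvRR_zero_iff n j).mp hz
      obtain ⟨haj, hbj⟩ := pvKey0 a b j (hfac' ▸ this)
      omega
    · intro i j hij hj he
      have := (pvRR_eq_iff n hn i j (by omega)).mp he
      obtain ⟨hai, hbi, -⟩ := pvKey N a b m hfac h2m h5m i (j-i) (by omega) this
      omega
    · refine (pvRR_zero_iff n (max a b)).mpr ?_
      show N ∣ 10 ^ max a b
      have h10 : (10:Nat)^(max a b) = 2^(max a b) * 5^(max a b) := by rw [← Nat.mul_pow]
      rw [hfac', h10]
      exact Nat.mul_dvd_mul (Nat.pow_dvd_pow 2 (by omega)) (Nat.pow_dvd_pow 5 (by omega))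
  · -- proper period: multiplicative order of 10 mod m
    rw [if_neg hm1]
    have hm : 1 < m := by omega
    have hcop : Nat.Coprime m 10 := pvCop m h2m h5m
    have htot : m ∣ 10 ^ Nat.totient m - 1 := by
      have ht := Nat.ModEq.pow_totient hcop.symm
      have h1 : (1:Nat) ≤ 10 ^ Nat.totient m := Nat.one_le_pow _ _ (by omega)
      exact (Nat.modEq_iff_dvd' h1).mp ht.symm
    have hex : ∃ t, 0 < t ∧ m ∣ 10^t - 1 := ⟨Nat.totient m, Nat.totient_pos.mpr (by omega), htot⟩
    set lam := Nat.find hex with hlamdef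
    obtain ⟨hlam1, hlamd⟩ := Nat.find_spec hex
    have hmin : ∀ t, 0 < t → m ∣ 10^t - 1 → lam ≤ t := fun t ht hd => Nat.find_min' hex ⟨ht, hd⟩
    have hlamN : lam ≤ N := by
      have h1 : lam ≤ Nat.totient m := hmin _ (Nat.totient_pos.mpr (by omega)) htot
      have h2 : Nat.totient m ≤ m := Nat.totient_le m
      have h3 : m ≤ N := Nat.le_of_dvd hNpos hmN
      omega
    have hA : pvLoopA n (2*N+2) (pvHist n 0) = ((max a b + lam : Nat) : Int) - ((max a b : Nat) : Int) := by
      refine pvRunA n (max a b + lam) (max a b) (by omega) ?_ ?_ ?_ ?_ (2*N+2) 0 (by omega) (by omega)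
      · intro j hj hz
        have hNj : N ∣ 10^j := (pvRR_zero_iff n j).mp hz
        have hdm : m ∣ 10^j := hmN.trans hNj
        exact hm1 (Nat.Coprime.eq_one_of_dvd (hcop.pow_right j) hdm)
      · intro i j hij hj he
        have := (pvRR_eq_iff n hn i j (by omega)).mp he
        obtain ⟨hai, hbi, hmd⟩ := pvKey N a b m hfac h2m h5m i (j-i) (by omega) this
        have := hmin (j-i) (by omega) hmd
        omega
      · intro i hi he
        have := (pvRR_eq_iff n hn i (max a b + lam) (by omega)).mp he
        obtain ⟨hai, hbi, -⟩ := pvKey N a b m hfac h2m h5m i _ (by omega) this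
        omega
      · refine (pvRR_eq_iff n hn (max a b) (max a b + lam) (by omega)).mpr ?_
        have hsub : max a b + lam - max a b = lam := by omega
        rw [hsub]
        exact pvRep N a b m hfac (max a b) lam (by omega) (by omega) hlamd
    have hB : pvOrderLoop m m (10 % m) 1 = lam := by
      have hlm : lam ≤ m := by
        have h1 : lam ≤ Nat.totient m := hmin _ (Nat.totient_pos.mpr (by omega)) htot
        have h2 := Nat.totient_le m
        omega
      have := pvRunB m hm lam hlam1 hlamd hmin m 1 (by omega) (by omega) (by omega)
      rw [pow_one] at this
      exact this
    rw [hhist0] at hA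
    rw [hA, hB]
    push_cast
    ring

-- ===== VERDICT (by name: the statement is the Claim_ definition above) =====
theorem reciprocal_periodicity_spec : Claim_equal_reciprocal_periodicity := by
  intro n _ hn
  show reciprocal_periodicity n = reciprocal_periodicity_alt n
  exact pvMain n hn
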